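-- pv_equiv track=rewrite | github.com/doobMM/hibari_tda | tda_pipeline/_archived_pre_unify/run_module_generation_v2.py | replicate_inst2
-- ===== SOURCE A (Python) =====
-- MODULE_LEN = 32
--
-- N_INST2 = 32
--
-- INST2_OFFSET = 33
--
-- def replicate_inst2(mod, n=N_INST2, ml=MODULE_LEN, init_off=INST2_OFFSET, gap=1):
--     out = []
--     period = ml + gap
--     for m in range(n):
--         cs = init_off + m * period
--         for s, p, e in mod:
--             ns = s + cs
--             ne = min(e + cs, cs + ml)
--             if ns < cs + ml and ne > ns:
--                 out.append((ns, p, ne))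
--     return out
-- ===== SOURCE B (Python) =====
-- def replicate_inst2(mod, n=32, ml=32, init_off=33, gap=1):
--     period = ml + gap
--     base = [(s, p, min(e, ml)) for s, p, e in mod if s < ml and min(e, ml) > s]
--     out = []
--     for m in range(n):
--         cs = init_off + m * period
--         for s, p, ce in base:
--             out.append((s + cs, p, ce + cs))
--     return out
-- ===== Notes on version B (the rewrite author's own statement) =====
-- stated objective: simpler
-- what changed: B hoists the offset-independent filtering and clamping out of the replication loop: it builds a normalized base list (s, p, min(e, ml)) once in a single pass over mod, then each of the n replication steps only shifts that base list by cs, instead of re-evaluating the clamp and both guards for every module in every step.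
import Mathlib
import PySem

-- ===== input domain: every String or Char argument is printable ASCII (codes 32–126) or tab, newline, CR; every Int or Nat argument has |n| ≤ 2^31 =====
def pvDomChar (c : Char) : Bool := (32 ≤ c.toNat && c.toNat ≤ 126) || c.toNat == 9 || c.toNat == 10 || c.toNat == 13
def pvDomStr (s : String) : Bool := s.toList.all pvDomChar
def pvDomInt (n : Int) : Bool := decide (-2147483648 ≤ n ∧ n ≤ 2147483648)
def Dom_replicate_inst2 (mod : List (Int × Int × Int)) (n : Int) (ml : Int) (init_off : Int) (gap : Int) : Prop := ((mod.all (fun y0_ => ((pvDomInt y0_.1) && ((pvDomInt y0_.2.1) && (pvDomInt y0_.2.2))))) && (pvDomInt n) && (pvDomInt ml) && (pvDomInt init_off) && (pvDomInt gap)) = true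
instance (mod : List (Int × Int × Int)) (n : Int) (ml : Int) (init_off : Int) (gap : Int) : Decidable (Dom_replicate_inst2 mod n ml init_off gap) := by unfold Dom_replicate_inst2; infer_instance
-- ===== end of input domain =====

-- B hoists the offset-independent filtering/clamping into a base list built once, then only shifts it per replication step (objective: simpler).

-- ===== PORT A =====
def replicate_inst2 (mod : List (Int × Int × Int)) (n : Int) (ml : Int) (init_off : Int) (gap : Int) : List (Int × Int × Int) :=
  let period := ml + gap
  (PySem.List.pyRange 0 n 1).foldl (fun out m =>
    let cs := init_off + m * period
    mod.foldl (fun out t =>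
      let ns := t.1 + cs
      let ne := min (t.2.2 + cs) (cs + ml)
      if ns < cs + ml ∧ ne > ns then out ++ [(ns, t.2.1, ne)] else out) out) []

-- ===== PORT B =====
def replicate_inst2_alt (mod : List (Int × Int × Int)) (n : Int) (ml : Int) (init_off : Int) (gap : Int) : List (Int × Int × Int) :=
  let period := ml + gap
  let base := mod.filterMap (fun t =>
    if t.1 < ml ∧ min t.2.2 ml > t.1 then some (t.1, t.2.1, min t.2.2 ml) else none)
  (PySem.List.pyRange 0 n 1).foldl (fun out m =>
    let cs := init_off + m * period
    out ++ base.map (fun b => (b.1 + cs, b.2.1, b.2.2 + cs))) []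

-- ===== PRECONDITION & SPEC =====
def Spec_replicate_inst2 (mod : List (Int × Int × Int)) (n : Int) (ml : Int) (init_off : Int) (gap : Int) (out : List (Int × Int × Int)) : Prop := out = replicate_inst2_alt mod n ml init_off gap
instance (mod : List (Int × Int × Int)) (n : Int) (ml : Int) (init_off : Int) (gap : Int) (out : List (Int × Int × Int)) : Decidable (Spec_replicate_inst2 mod n ml init_off gap out) := by unfold Spec_replicate_inst2; infer_instance

-- ===== CLAIM (what is proved, stated in full; the proofs are below) =====
def Claim_equal_replicate_inst2 : Prop := ∀ (mod : List (Int × Int × Int)) (n : Int) (ml : Int) (init_off : Int) (gap : Int), Dom_replicate_inst2 mod n ml init_off gap → Spec_replicate_inst2 mod n ml init_off gap (replicate_inst2 mod n ml init_off gap)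

-- ===== LEMMAS AND PROOFS =====

-- One replication step of A appends exactly the shifted base list.
theorem inner_step (mod : List (Int × Int × Int)) (ml cs : Int) :
    ∀ out : List (Int × Int × Int),
      mod.foldl (fun out t =>
        let ns := t.1 + cs
        let ne := min (t.2.2 + cs) (cs + ml)
        if ns < cs + ml ∧ ne > ns then out ++ [(ns, t.2.1, ne)] else out) out
      = out ++ (mod.filterMap (fun t =>
          if t.1 < ml ∧ min t.2.2 ml > t.1 then some (t.1, t.2.1, min t.2.2 ml) else none)).map
          (fun b => (b.1 + cs, b.2.1, b.2.2 + cs)) := by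
  induction mod with
  | nil => intro out; simp
  | cons t rest ih =>
    intro out
    simp only [List.foldl_cons, List.filterMap_cons]
    have hcond : (t.1 + cs < cs + ml ∧ min (t.2.2 + cs) (cs + ml) > t.1 + cs)
        ↔ (t.1 < ml ∧ min t.2.2 ml > t.1) := by
      constructor <;> intro h <;> exact ⟨by omega, by omega⟩
    by_cases h : t.1 < ml ∧ min t.2.2 ml > t.1
    · rw [if_pos (hcond.mpr h), if_pos h, ih]
      have : min (t.2.2 + cs) (cs + ml) = min t.2.2 ml + cs := by omega
      simp [this]
    · rw [if_neg (fun hc => h (hcond.mp hc)), if_neg h, ih]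

-- ===== VERDICT (by name: the statement is the Claim_ definition above) =====
theorem replicate_inst2_spec : Claim_equal_replicate_inst2 := by
  intro mod n ml init_off gap _
  unfold Spec_replicate_inst2 replicate_inst2 replicate_inst2_alt
  apply congrFun
  apply congrFun
  congr 1
  funext out m
  exact inner_step mod ml (init_off + m * (ml + gap)) out
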